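-- pv_equiv track=rewrite | github.com/sdiki1/test_for_vova_120 | lol.py | calculate
-- ===== SOURCE A (Python) =====
-- def calculate(n):
--     if n == 0 or n == 1:
--         return 1
--     else:
--         if n % 2 == 0:
--             return calculate(n // 2) + calculate(n // 2 - 1)
--         else:
--             return calculate(n // 2) - calculate(n // 2 - 1)
-- ===== SOURCE B (Python) =====
-- def calculate(n):
--     # Bottom-up over the binary digits of n: the only reachable recursion
--     # arguments are m and m-1 for m = n >> i, so a window of three consecutive
--     # values (f(m-2), f(m-1), f(m)) is pushed down the bits of n.
--     a, b, c = 0, 1, 1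
--     for bit in bin(n)[3:]:
--         if bit == '0':
--             a, b, c = b + a, b - a, c + b
--         else:
--             a, b, c = b - a, c + b, c - b
--     return c
-- ===== Notes on version B (the rewrite author's own statement) =====
-- stated objective: faster
-- what changed: Replaces the branching recursion (two recursive calls per level, Theta(n) calls in total) by a single iterative pass over the binary digits of n that carries the window (f(m-2), f(m-1), f(m)) for m = n >> i from the top bit down, so no recursion and no memo table at all.
import Mathlib
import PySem

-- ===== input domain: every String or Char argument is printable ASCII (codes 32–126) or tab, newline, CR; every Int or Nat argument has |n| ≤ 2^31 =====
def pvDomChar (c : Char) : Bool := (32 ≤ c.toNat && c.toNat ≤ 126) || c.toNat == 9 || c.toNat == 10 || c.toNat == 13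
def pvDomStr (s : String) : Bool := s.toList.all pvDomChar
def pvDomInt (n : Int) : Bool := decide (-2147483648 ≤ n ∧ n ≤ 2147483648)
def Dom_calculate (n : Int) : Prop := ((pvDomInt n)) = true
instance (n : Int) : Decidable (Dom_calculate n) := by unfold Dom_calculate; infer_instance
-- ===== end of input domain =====

-- B replaces A's two-calls-per-level recursion by one pass over the bits of n
-- carrying a three-value window; proved equal on all nonnegative inputs (A raises RecursionError on negative ones).

-- ===== PORT A =====
-- fuel makes the (on negative inputs non-terminating) Python recursion a total Lean
-- function; 'n.toNat + 1' fuel is always enough on Pre_.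
def calcFuelA (fuel : Nat) (n : Int) : Int :=
  match fuel with
  | 0 => 0
  | f + 1 =>
    if n = 0 ∨ n = 1 then 1
    else if PySem.Int.mod n 2 = 0 then
      calcFuelA f (PySem.Int.floordiv n 2) + calcFuelA f (PySem.Int.floordiv n 2 - 1)
    else
      calcFuelA f (PySem.Int.floordiv n 2) - calcFuelA f (PySem.Int.floordiv n 2 - 1)

def calculate (n : Int) : Int := calcFuelA (n.toNat + 1) n

-- ===== PORT B =====
-- bits of m, most significant first (bin(m) without the '0b' prefix)
def bitsMSB (m : Nat) : List Bool :=
  if hm0 : m = 0 then [] else bitsMSB (m / 2) ++ [decide (m % 2 = 1)]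
decreasing_by exact Nat.div_lt_self (Nat.pos_of_ne_zero hm0) one_lt_two

def stepB (s : Int × Int × Int) (bit : Bool) : Int × Int × Int :=
  match s, bit with
  | (a, b, c), false => (b + a, b - a, c + b)
  | (a, b, c), true  => (b - a, c + b, c - b)

def calculate_alt (n : Int) : Int :=
  (List.foldl stepB (0, 1, 1) ((bitsMSB n.toNat).drop 1)).2.2

-- ===== PRECONDITION & SPEC =====
-- On negative inputs the Python A recurses forever on calculate(n//2) (RecursionError), so Pre_ requires a nonnegative input.
def Pre_calculate (n : Int) : Prop := 0 ≤ n
instance (n : Int) : Decidable (Pre_calculate n) := by unfold Pre_calculate; infer_instance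
def pvWitness_calculate : Int := (6)

def Spec_calculate (n : Int) (out : Int) : Prop := out = calculate_alt n
instance (n : Int) (out : Int) : Decidable (Spec_calculate n out) := by unfold Spec_calculate; infer_instance

-- ===== CLAIM (what is proved, stated in full; the proofs are below) =====
def Claim_equal_calculate : Prop := ∀ (n : Int), Dom_calculate n → Pre_calculate n → Spec_calculate n (calculate n)

-- ===== LEMMAS AND PROOFS =====

-- the mathematical sequence both programs compute, on Nat
def F (k : Nat) : Int :=
  if k ≤ 1 then 1
  else if k % 2 = 0 then F (k / 2) + F (k / 2 - 1)
  else F (k / 2) - F (k / 2 - 1)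
decreasing_by all_goals omega

-- F extended by 0 below zero
def Fe (k : Int) : Int := if k < 0 then 0 else F k.toNat

def tri (m : Nat) : Int × Int × Int := (Fe ((m : Int) - 2), Fe ((m : Int) - 1), Fe m)

theorem Fe_of_nonneg (k : Int) (h : 0 ≤ k) : Fe k = F k.toNat := by
  rw [Fe, if_neg (by omega)]

theorem Fe_key (x : Int) (hx : 0 ≤ x) :
    Fe (2 * x) = Fe x + Fe (x - 1) ∧ Fe (2 * x + 1) = Fe x - Fe (x - 1) := by
  rcases eq_or_lt_of_le hx with h0 | h1
  · rw [← h0]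
    norm_num [Fe]
    rw [F, F]
    norm_num
  · constructor
    · rw [Fe_of_nonneg _ (by omega), Fe_of_nonneg _ (by omega), Fe_of_nonneg _ (by omega),
          show (2 * x).toNat = 2 * x.toNat from by omega, F,
          if_neg (by omega), if_pos (by omega)]
      congr 1 <;> congr 1 <;> omega
    · rw [Fe_of_nonneg _ (by omega), Fe_of_nonneg _ (by omega), Fe_of_nonneg _ (by omega),
          show (2 * x + 1).toNat = 2 * x.toNat + 1 from by omega, F,
          if_neg (by omega), if_neg (by omega)]
      congr 1 <;> congr 1 <;> omega

theorem stepB_tri (m : Nat) (hm : 1 ≤ m) (b : Bool) :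
    stepB (tri m) b = tri (2 * m + b.toNat) := by
  obtain ⟨k1, k2⟩ := Fe_key ((m : Int) - 1) (by omega)
  obtain ⟨k3, k4⟩ := Fe_key (m : Int) (by omega)
  cases b
  · simp only [stepB, tri]
    rw [show ((2 * m + Bool.false.toNat : Nat) : Int) = 2 * (m : Int) from by
          simp only [Bool.toNat_false, Nat.add_zero]; push_cast; ring,
        show 2 * (m : Int) - 2 = 2 * ((m : Int) - 1) from by ring,
        show 2 * (m : Int) - 1 = 2 * ((m : Int) - 1) + 1 from by ring,
        k1, k2, k3, show (m : Int) - 1 - 1 = (m : Int) - 2 from by ring]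
  · simp only [stepB, tri]
    rw [show ((2 * m + Bool.true.toNat : Nat) : Int) = 2 * (m : Int) + 1 from by
          simp only [Bool.toNat_true]; push_cast; ring,
        show 2 * (m : Int) + 1 - 2 = 2 * ((m : Int) - 1) + 1 from by ring,
        show 2 * (m : Int) + 1 - 1 = 2 * (m : Int) from by ring,
        k2, k3, k4, show (m : Int) - 1 - 1 = (m : Int) - 2 from by ring]

theorem bitsMSB_ne_nil (m : Nat) (h : 1 ≤ m) : bitsMSB m ≠ [] := by
  rw [bitsMSB, dif_neg (by omega)]
  simp

theorem main_inv (n : Nat) (hn : 1 ≤ n) :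
    List.foldl stepB (0, 1, 1) ((bitsMSB n).drop 1) = tri n := by
  induction n using Nat.strong_induction_on with
  | _ n ih =>
    by_cases h1 : n = 1
    · subst h1
      rw [bitsMSB, dif_neg one_ne_zero]
      norm_num
      rw [bitsMSB, dif_pos rfl]
      have hF0 : F 0 = 1 := by rw [F]; norm_num
      have hF1 : F 1 = 1 := by rw [F]; norm_num
      simp [tri, Fe, hF0, hF1]
    · have h2 : 2 ≤ n := by omega
      have hhalf : 1 ≤ n / 2 := by omega
      rw [bitsMSB, dif_neg (by omega)]
      obtain ⟨x, xs, hx⟩ : ∃ x xs, bitsMSB (n / 2) = x :: xs := by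
        cases h : bitsMSB (n / 2) with
        | nil => exact absurd h (bitsMSB_ne_nil (n / 2) hhalf)
        | cons x xs => exact ⟨x, xs, rfl⟩
      rw [hx, show ((x :: xs ++ [decide (n % 2 = 1)]).drop 1) = xs ++ [decide (n % 2 = 1)] from by simp,
          List.foldl_append]
      have ihh := ih (n / 2) (by omega) hhalf
      rw [hx] at ihh
      simp only [List.drop_one, List.tail_cons] at ihh
      simp only [List.foldl_cons, List.foldl_nil]
      rw [ihh, stepB_tri (n / 2) hhalf,
          show 2 * (n / 2) + (decide (n % 2 = 1)).toNat = n from by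
            by_cases hp : n % 2 = 1 <;> simp [hp] <;> omega]

theorem alt_eq_F (n : Nat) : calculate_alt (n : Int) = F n := by
  rcases Nat.eq_zero_or_pos n with h0 | h1
  · subst h0
    rw [calculate_alt]
    norm_num
    rw [bitsMSB, dif_pos rfl]
    simp
    rw [F]
    norm_num
  · rw [calculate_alt, Int.toNat_natCast, main_inv n h1]
    simp [tri, Fe_of_nonneg _ (by omega : (0:Int) ≤ (n:Int))]

theorem fuelA_eq_F (fuel : Nat) (n : Int) (hn : 0 ≤ n) (hf : n < fuel) :
    calcFuelA fuel n = F n.toNat := by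
  induction fuel generalizing n with
  | zero => simp at hf; omega
  | succ f ih =>
    rw [calcFuelA]
    by_cases hb : n = 0 ∨ n = 1
    · rw [if_pos hb, F, if_pos (by omega)]
    · rw [if_neg hb]
      have h2 : 2 ≤ n := by omega
      have hf' : n < (f : Int) + 1 := by exact_mod_cast hf
      have hfd : PySem.Int.floordiv n 2 = n / 2 :=
        PySem.Int.floordiv_eq_ediv_of_pos (by omega)
      have hmd : PySem.Int.mod n 2 = n % 2 :=
        PySem.Int.mod_eq_emod_of_pos (by omega)
      have hqA : n / 2 < (f : Int) := by omega
      have hqB : n / 2 - 1 < (f : Int) := by omega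
      have ihA := ih (n / 2) (by omega) hqA
      have ihB := ih (n / 2 - 1) (by omega) hqB
      rw [show (n / 2).toNat = n.toNat / 2 from by omega] at ihA
      rw [show (n / 2 - 1).toNat = n.toNat / 2 - 1 from by omega] at ihB
      rw [hfd, hmd]
      by_cases hpar : n % 2 = 0
      · rw [if_pos hpar, ihA, ihB]
        conv_rhs => rw [F]
        rw [if_neg (show ¬ n.toNat ≤ 1 from by omega), if_pos (show n.toNat % 2 = 0 from by omega)]
      · rw [if_neg hpar, ihA, ihB]
        conv_rhs => rw [F]
        rw [if_neg (show ¬ n.toNat ≤ 1 from by omega), if_neg (show ¬ n.toNat % 2 = 0 from by omega)]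

-- ===== VERDICT (by name: the statement is the Claim_ definition above) =====
theorem calculate_spec : Claim_equal_calculate := by
  intro n _ hpre
  unfold Spec_calculate calculate
  rw [fuelA_eq_F (n.toNat + 1) n hpre (by omega)]
  rw [show n = ((n.toNat : Nat) : Int) from (Int.toNat_of_nonneg hpre).symm, Int.toNat_natCast,
      alt_eq_F]
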